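-- pv_equiv track=rewrite | github.com/CornerMercury/AOC | 2025/python/day07/solve.py | part1
-- ===== SOURCE A (Python) =====
-- def part1(data):
--     l = data.split("\n")
--     s = set()
--     s.add((0,l[0].index("S")))
--     t = 0
--     while s:
--         new_s = set()
--         for y,x in s:
--             if y + 1 >= len(l):
--                 continue
--             if l[y + 1][x] == "^":
--                 t += 1
--                 if x - 1 >= 0:
--                     new_s.add((y + 1, x - 1))
--                 if x + 1 < len(l[0]):
--                     new_s.add((y + 1, x + 1))
--             else:
--                 new_s.add((y + 1, x))
--         s = new_s
--
--     return t
-- ===== SOURCE B (Python) =====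
-- def part1(data):
--     rows = data.split("\n")
--     H = len(rows)
--     W = len(rows[0])
--     start = (0, rows[0].index("S"))
--     visited = {start}
--     stack = [start]
--     while stack:
--         y, x = stack.pop()
--         if y + 1 >= H:
--             continue
--         if rows[y + 1][x] == "^":
--             nbrs = [(y + 1, nx) for nx in (x - 1, x + 1) if 0 <= nx < W]
--         else:
--             nbrs = [(y + 1, x)]
--         for q in nbrs:
--             if q not in visited:
--                 visited.add(q)
--                 stack.append(q)
--     return sum(1 for (y, x) in visited if y + 1 < H and rows[y + 1][x] == "^")
-- ===== Notes on version B (the rewrite author's own statement) =====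
-- stated objective: alternative
-- what changed: A runs a level-synchronous BFS, rebuilding a frontier set each row and counting spike hits inline as it scatters children; B is a depth-first flood fill with an explicit LIFO stack and one persistent visited set, and obtains the count in a separate final pass over the visited set (each reachable cell is visited once, so counting cells with a spike below equals A's per-level inline count).
-- outside the precondition, e.g. on part1('S.\n^'): A returns 1, B returns 1
import Mathlib
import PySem

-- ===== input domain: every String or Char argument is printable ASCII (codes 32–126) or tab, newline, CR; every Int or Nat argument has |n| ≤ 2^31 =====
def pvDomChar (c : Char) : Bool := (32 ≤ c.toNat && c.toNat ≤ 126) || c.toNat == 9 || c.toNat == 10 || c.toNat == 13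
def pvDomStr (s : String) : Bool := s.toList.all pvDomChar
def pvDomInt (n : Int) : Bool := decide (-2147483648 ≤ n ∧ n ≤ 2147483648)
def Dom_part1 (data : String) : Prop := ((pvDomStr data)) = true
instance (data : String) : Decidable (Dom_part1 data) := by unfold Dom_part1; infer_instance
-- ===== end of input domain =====

-- B replaces A's level-synchronous BFS (frontier set rebuilt each row, hits counted inline)
-- by a depth-first flood fill with an explicit stack and one persistent visited set, counting
-- the hits in a separate final pass over the visited set (objective: alternative; same cost class).

-- ===== PORT A =====
-- loop body: 'for y,x in s: …' — one element p of the frontier set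
def part1Body (l : List (List Char)) (st : Int × PySem.Set (Int × Int)) (p : Int × Int) :
    Int × PySem.Set (Int × Int) :=
  let t := st.1
  let ns := st.2
  let y := p.1
  let x := p.2
  if (l.length : Int) ≤ y + 1 then (t, ns)       -- if y + 1 >= len(l): continue
  else if PySem.List.pyGetD (PySem.List.pyGetD l (y + 1) []) x ' ' = '^' then
    -- l[y+1][x] == "^"  (pyGetD is exact here: Pre_ keeps every read in range)
    let ns := if (0:Int) ≤ x - 1 then PySem.Set.add ns (y + 1, x - 1) else ns
    let ns := if x + 1 < ((PySem.List.pyGetD l 0 []).length : Int) then PySem.Set.add ns (y + 1, x + 1) else ns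
    (t + 1, ns)
  else (t, PySem.Set.add ns (y + 1, x))

-- 'while s: …' — every frontier element at iteration k has first component k, so
-- len(l)+1 iterations always empty the set; fuel = l.length + 1
def part1Loop (l : List (List Char)) : Nat → PySem.Set (Int × Int) → Int → Int
  | 0, _, t => t
  | fuel + 1, s, t =>
    if s = [] then t
    else
      let r := s.foldl (part1Body l) (t, PySem.Set.empty)
      part1Loop l fuel r.2 r.1

def part1 (data : String) : Int :=
  let l : List (List Char) := (PySem.Chars.split? data.toList ['\n']).getD []   -- data.split("\n")
  -- l[0].index("S"): ported with find — exact whenever 'S' occurs in l[0] (Pre_; .index raises otherwise)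
  let s : PySem.Set (Int × Int) :=
    PySem.Set.add PySem.Set.empty ((0 : Int), PySem.Chars.find (PySem.List.pyGetD l 0 []) ['S'])
  part1Loop l (l.length + 1) s 0

-- ===== PORT B =====
-- the in-bounds neighbours pushed from a popped cell (y,x): the two diagonals below a spike,
-- else the cell straight below
def dfsNbrs (rows : List (List Char)) (W : Int) (y x : Int) : List (Int × Int) :=
  if PySem.List.pyGetD (PySem.List.pyGetD rows (y + 1) []) x ' ' = '^' then
    ([(y + 1, x - 1), (y + 1, x + 1)]).filter (fun q => decide (0 ≤ q.2) && decide (q.2 < W))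
  else [(y + 1, x)]

-- 'if q not in visited: visited.add(q); stack.append(q)' (stack head = top, matching pop())
def dfsPush (sv : List (Int × Int) × PySem.Set (Int × Int)) (q : Int × Int) :
    List (Int × Int) × PySem.Set (Int × Int) :=
  if q ∈ sv.2 then sv else (q :: sv.1, PySem.Set.add sv.2 q)

-- 'while stack: …' — each loop turn pops one cell and grows visited with each push, so
-- 2*H*W+1 turns always drain the stack; fuel = 2 * rows.length * len(rows[0]) + 1
def dfsLoop (rows : List (List Char)) (W : Int) :
    Nat → List (Int × Int) → PySem.Set (Int × Int) → PySem.Set (Int × Int)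
  | 0, _, vis => vis
  | _ + 1, [], vis => vis
  | fuel + 1, p :: rest, vis =>
    if (rows.length : Int) ≤ p.1 + 1 then dfsLoop rows W fuel rest vis   -- if y+1 >= H: continue
    else dfsLoop rows W fuel
      ((dfsNbrs rows W p.1 p.2).foldl dfsPush (rest, vis)).1
      ((dfsNbrs rows W p.1 p.2).foldl dfsPush (rest, vis)).2

def part1_alt (data : String) : Int :=
  let rows : List (List Char) := (PySem.Chars.split? data.toList ['\n']).getD []  -- data.split("\n")
  let H : Int := (rows.length : Int)
  let r0 := PySem.List.pyGetD rows 0 []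
  let W : Int := (r0.length : Int)
  let start : Int × Int := (0, PySem.Chars.find r0 ['S'])    -- rows[0].index("S"), exact under Pre_
  let visited := dfsLoop rows W (2 * rows.length * r0.length + 1) [start]
    (PySem.Set.add PySem.Set.empty start)
  -- sum(1 for (y,x) in visited if y+1 < H and rows[y+1][x] == "^")
  ((visited.countP (fun p => decide (p.1 + 1 < H)
      && (PySem.List.pyGetD (PySem.List.pyGetD rows (p.1 + 1) []) p.2 ' ' == '^')) : Nat) : Int)

-- ===== PRECONDITION & SPEC =====
-- Pre_ excludes (a) first rows without 'S', where Python's .index raises ValueError, and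
-- (b) grids with a later row shorter than row 0: on some of those A raises IndexError (a
-- droplet landing past the row's end), and exactly which is not closed-form, so all such
-- ragged-short grids are excluded (on the others A and B agree, see cites).
def Pre_part1 (data : String) : Prop :=
  let rows : List (List Char) := (PySem.Chars.split? data.toList ['\n']).getD []
  let r0 := PySem.List.pyGetD rows 0 []
  ('S' ∈ r0) ∧ ∀ r ∈ rows.tail, r0.length ≤ r.length
instance (data : String) : Decidable (Pre_part1 data) := by unfold Pre_part1; infer_instance

def pvWitness_part1 : String := "S.\n^."

def Spec_part1 (data : String) (out : Int) : Prop := out = part1_alt data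
instance (data : String) (out : Int) : Decidable (Spec_part1 data out) := by unfold Spec_part1; infer_instance

-- ===== CLAIM (what is proved, stated in full; the proofs are below) =====
def Claim_equal_part1 : Prop := ∀ (data : String), Dom_part1 data → Pre_part1 data → Spec_part1 data (part1 data)

-- ===== LEMMAS AND PROOFS =====

-- proof-side abbreviations
def pvW (rows : List (List Char)) : Nat := (PySem.List.pyGetD rows 0 []).length

-- the children A scatters from one frontier element
def pvKids (rows : List (List Char)) (p : Int × Int) : List (Int × Int) :=
  if PySem.List.pyGetD (PySem.List.pyGetD rows (p.1 + 1) []) p.2 ' ' = '^' then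
    (if (0:Int) ≤ p.2 - 1 then [(p.1 + 1, p.2 - 1)] else []) ++
    (if p.2 + 1 < ((pvW rows : Nat) : Int) then [(p.1 + 1, p.2 + 1)] else [])
  else [(p.1 + 1, p.2)]

def pvBox (rows : List (List Char)) (p : Int × Int) : Prop :=
  0 ≤ p.1 ∧ p.1 < (rows.length : Int) ∧ 0 ≤ p.2 ∧ p.2 < ((pvW rows : Nat) : Int)

-- the positions a droplet can occupy, as a reachability predicate
inductive pvReach (rows : List (List Char)) (start : Int × Int) : Int × Int → Prop
  | init : pvReach rows start start
  | step (p q : Int × Int) : pvReach rows start p → p.1 + 1 < (rows.length : Int) →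
      q ∈ pvKids rows p → pvReach rows start q

-- 'there is a spike directly below p' (out-of-grid rows read as [] and give false)
def pvSpk (rows : List (List Char)) (p : Int × Int) : Bool :=
  PySem.List.pyGetD (PySem.List.pyGetD rows (p.1 + 1) []) p.2 ' ' == '^'

theorem pvLoopNil (rows : List (List Char)) (fuel : Nat) (t : Int) :
    part1Loop rows fuel [] t = t := by
  cases fuel <;> simp [part1Loop]

theorem pvLoopStep (rows : List (List Char)) (m : Nat) (s : PySem.Set (Int × Int)) (t : Int)
    (hs : s ≠ []) :
    part1Loop rows (m + 1) s t
      = part1Loop rows m (s.foldl (part1Body rows) (t, PySem.Set.empty)).2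
          (s.foldl (part1Body rows) (t, PySem.Set.empty)).1 := by
  conv_lhs => rw [part1Loop]
  rw [if_neg hs]

theorem pvKids_cases (rows : List (List Char)) (p q : Int × Int) (hq : q ∈ pvKids rows p) :
    (q = (p.1 + 1, p.2 - 1) ∧ 0 ≤ p.2 - 1) ∨
    (q = (p.1 + 1, p.2 + 1) ∧ p.2 + 1 < ((pvW rows : Nat) : Int)) ∨
    q = (p.1 + 1, p.2) := by
  unfold pvKids at hq
  split_ifs at hq with h0 h1 h2 <;>
    simp only [List.mem_append, List.mem_singleton, List.not_mem_nil, or_false, false_or] at hq <;>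
    tauto

theorem pvKids_level (rows : List (List Char)) (p q : Int × Int) (hq : q ∈ pvKids rows p) :
    q.1 = p.1 + 1 := by
  rcases pvKids_cases rows p q hq with ⟨rfl, -⟩ | ⟨rfl, -⟩ | rfl <;> rfl

theorem pvKids_box (rows : List (List Char)) (p q : Int × Int) (hp : pvBox rows p)
    (h : p.1 + 1 < (rows.length : Int)) (hq : q ∈ pvKids rows p) : pvBox rows q := by
  unfold pvBox at hp ⊢
  rcases pvKids_cases rows p q hq with ⟨rfl, hg⟩ | ⟨rfl, hg⟩ | rfl <;>
    refine ⟨by omega, by omega, by omega, by omega⟩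

theorem pvReach_box (rows : List (List Char)) (start : Int × Int) (hst : pvBox rows start)
    {q : Int × Int} (hq : pvReach rows start q) : pvBox rows q := by
  induction hq with
  | init => exact hst
  | step p q hp hlt hk ih => exact pvKids_box rows p q ih hlt hk

theorem pvReach_descend (rows : List (List Char)) (start : Int × Int) (hst : start.1 = 0)
    {q : Int × Int} (hq : pvReach rows start q) :
    ∀ i : Int, 0 ≤ i → i ≤ q.1 → ∃ p, pvReach rows start p ∧ p.1 = i := by
  induction hq with
  | init =>
    intro i h0 h1
    rw [hst] at h1
    exact ⟨start, pvReach.init, by omega⟩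
  | step p q hp hlt hk ih =>
    intro i h0 h1
    have hlev := pvKids_level rows p q hk
    by_cases hi : i ≤ p.1
    · exact ih i h0 hi
    · exact ⟨q, pvReach.step p q hp hlt hk, by omega⟩

theorem pvCountSplit {α : Type} (l : List α) (f g h : α → Bool)
    (hfgh : ∀ x ∈ l, f x = (g x || h x) ∧ ¬(g x = true ∧ h x = true)) :
    l.countP f = l.countP g + l.countP h := by
  induction l with
  | nil => simp
  | cons a l ih =>
    have ha := hfgh a (List.mem_cons_self ..)
    have ih' := ih (fun x hx => hfgh x (List.mem_cons_of_mem _ hx))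
    simp only [List.countP_cons, ih']
    rcases ha with ⟨hf, hgh⟩
    cases hg : g a <;> cases hh : h a <;> rw [hg, hh] at hf hgh <;> simp [hf] at * <;> omega

theorem pvCard (rows : List (List Char)) (l : List (Int × Int)) (hnd : l.Nodup)
    (hbox : ∀ p ∈ l, pvBox rows p) : l.length ≤ rows.length * pvW rows := by
  have henc : (l.map (fun p => (p.1.toNat, p.2.toNat))).Nodup := by
    refine List.Nodup.map_on ?_ hnd
    intro p hp q hq he
    have bp := hbox p hp
    have bq := hbox q hq
    unfold pvBox at bp bq
    obtain ⟨h1, h2⟩ := Prod.mk.injEq .. ▸ he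
    exact Prod.ext_iff.2 ⟨by omega, by omega⟩
  have hsub : (l.map (fun p => (p.1.toNat, p.2.toNat))).toFinset ⊆
      Finset.range rows.length ×ˢ Finset.range (pvW rows) := by
    intro x hx
    rw [List.mem_toFinset, List.mem_map] at hx
    obtain ⟨p, hp, rfl⟩ := hx
    have := hbox p hp
    unfold pvBox at this
    rw [Finset.mem_product, Finset.mem_range, Finset.mem_range]
    constructor <;> omega
  calc l.length = (l.map (fun p => (p.1.toNat, p.2.toNat))).length := (List.length_map ..).symm
    _ = (l.map (fun p => (p.1.toNat, p.2.toNat))).toFinset.card :=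
        (List.toFinset_card_of_nodup henc).symm
    _ ≤ (Finset.range rows.length ×ˢ Finset.range (pvW rows)).card := Finset.card_le_card hsub
    _ = rows.length * pvW rows := by rw [Finset.card_product, Finset.card_range, Finset.card_range]

theorem pvFoldSkip (rows : List (List Char)) :
    ∀ (xs : List (Int × Int)) (st : Int × PySem.Set (Int × Int)),
      (∀ p ∈ xs, (rows.length : Int) ≤ p.1 + 1) →
      xs.foldl (part1Body rows) st = st := by
  intro xs
  induction xs with
  | nil => intro st h; rfl
  | cons p rest ih =>
    intro st h
    simp only [List.foldl_cons]
    have hb : part1Body rows st p = st := by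
      simp [part1Body, if_pos (h p (List.mem_cons_self ..))]
    rw [hb]
    exact ih st (fun q hq => h q (List.mem_cons_of_mem _ hq))

theorem pvFoldFst (rows : List (List Char)) (k : Nat) (hk : ((k:Int) + 1) < (rows.length : Int)) :
    ∀ (xs : List (Int × Int)) (t : Int) (ns : PySem.Set (Int × Int)),
      (∀ p ∈ xs, p.1 = (k:Int)) →
      (xs.foldl (part1Body rows) (t, ns)).1
        = t + xs.countP (fun p => PySem.List.pyGetD (PySem.List.pyGetD rows ((k:Int)+1) []) p.2 ' ' == '^') := by
  intro xs
  induction xs with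
  | nil => intro t ns _; simp
  | cons p rest ih =>
    intro t ns h
    have hp1 : p.1 = (k:Int) := h p (List.mem_cons_self ..)
    have hrest : ∀ q ∈ rest, q.1 = (k:Int) := fun q hq => h q (List.mem_cons_of_mem _ hq)
    have hno : ¬ ((rows.length : Int) ≤ p.1 + 1) := by rw [hp1]; omega
    simp only [List.foldl_cons, List.countP_cons]
    by_cases hc : PySem.List.pyGetD (PySem.List.pyGetD rows (p.1 + 1) []) p.2 ' ' = '^'
    · have hb : part1Body rows (t, ns) p
          = (t + 1, (part1Body rows (t, ns) p).2) := by
        simp [part1Body, if_neg hno, if_pos hc]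
      rw [hb, ih _ _ hrest]
      have hpred : (PySem.List.pyGetD (PySem.List.pyGetD rows ((k:Int)+1) []) p.2 ' ' == '^') = true := by
        rw [← hp1]; exact beq_iff_eq.2 hc
      rw [hpred]
      simp
      omega
    · have hb : part1Body rows (t, ns) p
          = (t, (part1Body rows (t, ns) p).2) := by
        simp [part1Body, if_neg hno, if_neg hc]
      rw [hb, ih _ _ hrest]
      have hpred : (PySem.List.pyGetD (PySem.List.pyGetD rows ((k:Int)+1) []) p.2 ' ' == '^') = false := by
        rw [← hp1]; exact beq_eq_false_iff_ne.2 hc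
      rw [hpred]
      simp

theorem pvFoldSnd (rows : List (List Char)) (k : Nat) (hk : ((k:Int) + 1) < (rows.length : Int)) :
    ∀ (xs : List (Int × Int)) (t : Int) (ns : PySem.Set (Int × Int)),
      (∀ p ∈ xs, p.1 = (k:Int)) → ns.Nodup →
      ((xs.foldl (part1Body rows) (t, ns)).2.Nodup ∧
       ∀ q, q ∈ (xs.foldl (part1Body rows) (t, ns)).2 ↔ q ∈ ns ∨ ∃ p ∈ xs, q ∈ pvKids rows p) := by
  intro xs
  induction xs with
  | nil => intro t ns _ hnd; exact ⟨hnd, by simp⟩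
  | cons p rest ih =>
    intro t ns h hnd
    have hp1 : p.1 = (k:Int) := h p (List.mem_cons_self ..)
    have hrest : ∀ q ∈ rest, q.1 = (k:Int) := fun q hq => h q (List.mem_cons_of_mem _ hq)
    have hno : ¬ ((rows.length : Int) ≤ p.1 + 1) := by rw [hp1]; omega
    -- one body step: the new accumulator set
    have hstep : (part1Body rows (t, ns) p).2.Nodup ∧
        ∀ q, q ∈ (part1Body rows (t, ns) p).2 ↔ q ∈ ns ∨ q ∈ pvKids rows p := by
      by_cases hc : PySem.List.pyGetD (PySem.List.pyGetD rows (p.1 + 1) []) p.2 ' ' = '^'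
      · simp only [part1Body, if_neg hno, if_pos hc, pvKids]
        constructor
        · split_ifs <;>
            first
              | exact PySem.Set.nodup_add _ _ (PySem.Set.nodup_add _ _ hnd)
              | exact PySem.Set.nodup_add _ _ hnd
              | exact hnd
        · intro q
          split_ifs with h1 h2 h2 <;>
            simp [PySem.Set.mem_add] <;> tauto
      · simp only [part1Body, if_neg hno, if_neg hc, pvKids]
        refine ⟨PySem.Set.nodup_add _ _ hnd, ?_⟩
        intro q
        simp [PySem.Set.mem_add]
    obtain ⟨hnd', hmem'⟩ := hstep
    simp only [List.foldl_cons]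
    have hrec := ih (part1Body rows (t, ns) p).1 (part1Body rows (t, ns) p).2 hrest hnd'
    rw [show part1Body rows (t, ns) p
        = ((part1Body rows (t, ns) p).1, (part1Body rows (t, ns) p).2) from rfl]
    refine ⟨hrec.1, ?_⟩
    intro q
    rw [hrec.2 q]
    simp only [List.mem_cons, hmem']
    constructor
    · rintro ((hq | hq) | ⟨r, hr, hq⟩)
      · exact Or.inl hq
      · exact Or.inr ⟨p, Or.inl rfl, hq⟩
      · exact Or.inr ⟨r, Or.inr hr, hq⟩
    · rintro (hq | ⟨r, (rfl | hr), hq⟩)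
      · exact Or.inl (Or.inl hq)
      · exact Or.inl (Or.inr hq)
      · exact Or.inr ⟨r, hr, hq⟩

-- 'a row below the grid holds no spike'
theorem pvSpk_out (rows : List (List Char)) (p : Int × Int)
    (h : p.1 + 1 = ((rows.length : Nat) : Int)) : pvSpk rows p = false := by
  unfold pvSpk
  have h1 : PySem.List.pyGetD rows (p.1 + 1) [] = ([] : List Char) := by
    rw [h, PySem.List.pyGetD_natCast]
    exact List.getD_eq_default _ _ (le_refl _)
  rw [h1]
  have h2 : PySem.List.pyGetD ([] : List Char) p.2 ' ' = ' ' := by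
    apply PySem.List.pyGetD_of_none
    rw [PySem.List.pyGet?_eq_none_iff]
    simp [PySem.Raise.InRange]
  rw [h2]
  decide

-- A's loop, measured against any list V enumerating the reachable set: starting at level k
-- it adds exactly the spike count of the reachable cells at levels ≥ k
theorem pvALoop (rows : List (List Char)) (start : Int × Int) (hst : start.1 = 0)
    (hbox : pvBox rows start) (V : List (Int × Int)) (hVnd : V.Nodup)
    (hV : ∀ q, q ∈ V ↔ pvReach rows start q) :
    ∀ (m k : Nat), k + m = rows.length →
    ∀ (s : PySem.Set (Int × Int)) (t : Int),
      s.Nodup → (∀ p, p ∈ s ↔ pvReach rows start p ∧ p.1 = (k : Int)) →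
      part1Loop rows (m + 1) s t
        = t + ((V.filter (fun p => decide ((k : Int) ≤ p.1))).countP (pvSpk rows) : Int) := by
  intro m
  induction m with
  | zero =>
    intro k hk s t hnd hmem
    have hsnil : s = [] := by
      rw [List.eq_nil_iff_forall_not_mem]
      intro p hp
      obtain ⟨hr, hl⟩ := (hmem p).1 hp
      have hb := pvReach_box rows start hbox hr
      unfold pvBox at hb
      omega
    have hfil : V.filter (fun p => decide ((k:Int) ≤ p.1)) = [] := by
      rw [List.filter_eq_nil_iff]
      intro p hp
      have hb := pvReach_box rows start hbox ((hV p).1 hp)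
      unfold pvBox at hb
      simp only [decide_eq_true_eq]
      omega
    rw [hsnil, hfil, pvLoopNil]
    simp
  | succ m ih =>
    intro k hk s t hnd hmem
    by_cases hs : s = []
    · have hfil : V.filter (fun p => decide ((k:Int) ≤ p.1)) = [] := by
        rw [List.filter_eq_nil_iff]
        intro q hq
        have hr := (hV q).1 hq
        simp only [decide_eq_true_eq]
        intro hki
        obtain ⟨p, hp, hpl⟩ := pvReach_descend rows start hst hr (k:Int) (by positivity) hki
        have := (hmem p).2 ⟨hp, hpl⟩
        rw [hs] at this
        exact List.not_mem_nil this
      rw [hs, hfil, pvLoopNil]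
      simp
    · obtain ⟨p0, hp0⟩ := List.exists_mem_of_ne_nil s hs
      obtain ⟨hr0, hl0⟩ := (hmem p0).1 hp0
      have hb0 := pvReach_box rows start hbox hr0
      have hkH : (k:Int) < (rows.length:Int) := by unfold pvBox at hb0; omega
      rw [pvLoopStep rows (m + 1) s t hs]
      have hall : ∀ p ∈ s, p.1 = (k:Int) := fun p hp => ((hmem p).1 hp).2
      by_cases hk1 : ((k:Int) + 1) < (rows.length:Int)
      · have hfst := pvFoldFst rows k hk1 s t PySem.Set.empty hall
        have hsnd := pvFoldSnd rows k hk1 s t PySem.Set.empty hall List.nodup_nil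
        have hihmem : ∀ q, q ∈ (s.foldl (part1Body rows) (t, PySem.Set.empty)).2
            ↔ pvReach rows start q ∧ q.1 = (((k+1 : Nat)) : Int) := by
          intro q
          rw [hsnd.2 q]
          simp only [PySem.Set.empty, List.not_mem_nil, false_or]
          constructor
          · rintro ⟨p, hp, hq⟩
            obtain ⟨hrp, hlp⟩ := (hmem p).1 hp
            have hlq := pvKids_level rows p q hq
            exact ⟨pvReach.step p q hrp (by omega) hq, by push_cast; omega⟩
          · rintro ⟨hr, hl⟩
            push_cast at hl
            cases hr with
            | init => rw [hst] at hl; omega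
            | step p q hp hlt hkid =>
              have hlq := pvKids_level rows p q hkid
              exact ⟨p, (hmem p).2 ⟨hp, by omega⟩, hkid⟩
        have hrec := ih (k+1) (by omega)
          (s.foldl (part1Body rows) (t, PySem.Set.empty)).2
          (s.foldl (part1Body rows) (t, PySem.Set.empty)).1
          hsnd.1 hihmem
        rw [hrec, hfst]
        -- counting: s's spike count is the level-k slice, and the ≥k slice splits at k
        have hcg : s.countP (fun p => PySem.List.pyGetD (PySem.List.pyGetD rows ((k:Int)+1) []) p.2 ' ' == '^')
            = s.countP (pvSpk rows) := by
          apply List.countP_congr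
          intro p hp
          unfold pvSpk
          rw [hall p hp]
        have hperm : s.Perm (V.filter (fun p => decide (p.1 = (k:Int)))) := by
          rw [List.perm_ext_iff_of_nodup hnd (hVnd.filter _)]
          intro q
          simp only [hmem q, List.mem_filter, hV q, decide_eq_true_eq]
          try tauto
        have hsplit : (V.filter (fun p => decide ((k:Int) ≤ p.1))).countP (pvSpk rows)
            = (V.filter (fun p => decide (p.1 = (k:Int)))).countP (pvSpk rows)
              + (V.filter (fun p => decide ((((k+1:Nat)):Int) ≤ p.1))).countP (pvSpk rows) := by
          rw [List.countP_filter, List.countP_filter, List.countP_filter]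
          apply pvCountSplit
          intro x _
          push_cast
          by_cases h1 : x.1 = (k:Int) <;> by_cases h2 : (k:Int) + 1 ≤ x.1 <;>
            simp [h1, h2] <;> omega
        rw [hcg, hperm.countP_eq, hsplit]
        push_cast
        ring
      · -- k+1 = rows.length: everything is skipped, and no spike row exists below level k
        have hskip : s.foldl (part1Body rows) (t, PySem.Set.empty) = (t, PySem.Set.empty) := by
          apply pvFoldSkip
          intro p hp
          rw [hall p hp]
          omega
        rw [hskip]
        show part1Loop rows (m + 1) [] t = _
        rw [pvLoopNil]
        have hcz : (V.filter (fun p => decide ((k:Int) ≤ p.1))).countP (pvSpk rows) = 0 := by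
          rw [List.countP_eq_zero]
          intro q hq
          rw [List.mem_filter] at hq
          obtain ⟨hqV, hqk⟩ := hq
          simp only [decide_eq_true_eq] at hqk
          have hb := pvReach_box rows start hbox ((hV q).1 hqV)
          unfold pvBox at hb
          have : q.1 + 1 = ((rows.length : Nat) : Int) := by omega
          simp [pvSpk_out rows q this]
        rw [hcz]
        simp

-- inside the grid columns, B's pushed neighbours are exactly A's scattered children
theorem pvNbrsKids (rows : List (List Char)) (p : Int × Int)
    (h0 : 0 ≤ p.2) (hW : p.2 < ((pvW rows : Nat) : Int)) :
    dfsNbrs rows ((pvW rows : Nat) : Int) p.1 p.2 = pvKids rows p := by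
  unfold dfsNbrs pvKids
  by_cases hs : PySem.List.pyGetD (PySem.List.pyGetD rows (p.1 + 1) []) p.2 ' ' = '^'
  · rw [if_pos hs, if_pos hs]
    by_cases c2 : p.2 + 1 < ((pvW rows : Nat) : Int) <;>
      simp [List.filter_cons, c2, show p.2 - 1 < ((pvW rows : Nat) : Int) by omega,
        show (0:Int) ≤ p.2 + 1 by omega] <;>
      split_ifs <;>
      simp_all
  · rw [if_neg hs, if_neg hs]

-- the inner 'for q in nbrs' push loop of B, over any list l
theorem pvPushFold (l : List (Int × Int)) :
    ∀ (st : List (Int × Int)) (vis : PySem.Set (Int × Int)), vis.Nodup →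
      ((l.foldl dfsPush (st, vis)).2.Nodup
       ∧ (∀ q, q ∈ (l.foldl dfsPush (st, vis)).2 ↔ q ∈ vis ∨ q ∈ l)
       ∧ (∀ q ∈ st, q ∈ (l.foldl dfsPush (st, vis)).1)
       ∧ (∀ q ∈ (l.foldl dfsPush (st, vis)).1, q ∈ st ∨ q ∈ l)
       ∧ (∀ q ∈ (l.foldl dfsPush (st, vis)).2, q ∈ vis ∨ q ∈ (l.foldl dfsPush (st, vis)).1)
       ∧ (l.foldl dfsPush (st, vis)).1.length + vis.length
           = st.length + (l.foldl dfsPush (st, vis)).2.length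
       ∧ vis.length ≤ (l.foldl dfsPush (st, vis)).2.length) := by
  induction l with
  | nil =>
    intro st vis h
    exact ⟨h, by simp, by simp, fun q hq => Or.inl hq, fun q hq => Or.inl hq, by simp, le_refl _⟩
  | cons a l ih =>
    intro st vis h
    simp only [List.foldl_cons]
    by_cases ha : a ∈ vis
    · have hstep : dfsPush (st, vis) a = (st, vis) := by simp [dfsPush, ha]
      rw [hstep]
      obtain ⟨n1, n2, n3, n4, n5, n6, n7⟩ := ih st vis h
      refine ⟨n1, ?_, n3, ?_, n5, n6, n7⟩
      · intro q
        rw [n2 q]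
        simp only [List.mem_cons]
        constructor
        · rintro (h1 | h1)
          · exact Or.inl h1
          · exact Or.inr (Or.inr h1)
        · rintro (h1 | rfl | h1)
          · exact Or.inl h1
          · exact Or.inl ha
          · exact Or.inr h1
      · intro q hq
        rcases n4 q hq with h1 | h1
        · exact Or.inl h1
        · exact Or.inr (List.mem_cons_of_mem _ h1)
    · have hstep : dfsPush (st, vis) a = (a :: st, PySem.Set.add vis a) := by
        simp [dfsPush, ha]
      rw [hstep]
      have hnd' : (PySem.Set.add vis a).Nodup := PySem.Set.nodup_add _ _ h
      obtain ⟨n1, n2, n3, n4, n5, n6, n7⟩ := ih (a :: st) (PySem.Set.add vis a) hnd'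
      have hlen : (PySem.Set.add vis a).length = vis.length + 1 := by
        rw [PySem.Set.add_of_not_mem ha]
        simp
      have hcons : (a :: st).length = st.length + 1 := rfl
      refine ⟨n1, ?_, ?_, ?_, ?_, by omega, by omega⟩
      · intro q
        rw [n2 q, PySem.Set.mem_add]
        simp only [List.mem_cons]
        tauto
      · intro q hq
        exact n3 q (List.mem_cons_of_mem _ hq)
      · intro q hq
        rcases n4 q hq with h1 | h1
        · rcases List.mem_cons.1 h1 with rfl | h1
          · exact Or.inr (List.mem_cons_self ..)
          · exact Or.inl h1
        · exact Or.inr (List.mem_cons_of_mem _ h1)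
      · intro q hq
        rcases n5 q hq with h1 | h1
        · rw [PySem.Set.mem_add] at h1
          rcases h1 with h1 | rfl
          · exact Or.inl h1
          · exact Or.inr (n3 q (List.mem_cons_self ..))
        · exact Or.inr h1

-- B's DFS: from a sound, pending-closed state with enough fuel, the final visited set is
-- nodup, grows from vis, stays inside the reachable box, and is closed under children
theorem pvBLoop (rows : List (List Char)) (start : Int × Int) :
    ∀ (fuel : Nat) (stack : List (Int × Int)) (vis : PySem.Set (Int × Int)),
      vis.Nodup →
      (∀ p ∈ vis, pvBox rows p) →
      (∀ p ∈ vis, pvReach rows start p) →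
      (∀ p ∈ stack, p ∈ vis) →
      (∀ p ∈ vis, p ∈ stack ∨ (p.1 + 1 < (rows.length : Int) → ∀ q ∈ pvKids rows p, q ∈ vis)) →
      ((stack.length : Int) + 2 * (((rows.length * pvW rows : Nat) : Int) - (vis.length : Int))
          ≤ (fuel : Int)) →
      ((dfsLoop rows ((pvW rows : Nat) : Int) fuel stack vis).Nodup
       ∧ (∀ p ∈ vis, p ∈ dfsLoop rows ((pvW rows : Nat) : Int) fuel stack vis)
       ∧ (∀ p ∈ dfsLoop rows ((pvW rows : Nat) : Int) fuel stack vis, pvReach rows start p)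
       ∧ (∀ p ∈ dfsLoop rows ((pvW rows : Nat) : Int) fuel stack vis, pvBox rows p)
       ∧ (∀ p ∈ dfsLoop rows ((pvW rows : Nat) : Int) fuel stack vis,
            p.1 + 1 < (rows.length : Int) →
            ∀ q ∈ pvKids rows p, q ∈ dfsLoop rows ((pvW rows : Nat) : Int) fuel stack vis)) := by
  intro fuel
  induction fuel with
  | zero =>
    intro stack vis hnd hboxv hreachv hstack hpend hm
    have hvc : vis.length ≤ rows.length * pvW rows := pvCard rows vis hnd hboxv
    have hstack0 : stack = [] := by
      rw [← List.length_eq_zero_iff]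
      omega
    subst hstack0
    show ((vis.Nodup) ∧ _)
    refine ⟨hnd, fun p hp => hp, hreachv, hboxv, ?_⟩
    intro p hp
    rcases hpend p hp with h | h
    · exact (List.not_mem_nil h).elim
    · exact h
  | succ fuel ih =>
    intro stack vis hnd hboxv hreachv hstack hpend hm
    cases stack with
    | nil =>
      show ((vis.Nodup) ∧ _)
      refine ⟨hnd, fun p hp => hp, hreachv, hboxv, ?_⟩
      intro p hp
      rcases hpend p hp with h | h
      · exact (List.not_mem_nil h).elim
      · exact h
    | cons p rest =>
      have hpv : p ∈ vis := hstack p (List.mem_cons_self ..)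
      simp only [dfsLoop]
      by_cases hskip : (rows.length : Int) ≤ p.1 + 1
      · rw [if_pos hskip]
        apply ih rest vis hnd hboxv hreachv
          (fun q hq => hstack q (List.mem_cons_of_mem _ hq))
        · intro q hq
          rcases hpend q hq with h | h
          · rcases List.mem_cons.1 h with rfl | h
            · exact Or.inr (fun hlt _ _ => absurd hlt (by omega))
            · exact Or.inl h
          · exact Or.inr h
        · simp only [List.length_cons] at hm
          push_cast at hm ⊢
          omega
      · rw [if_neg hskip]
        have hlt : p.1 + 1 < (rows.length : Int) := lt_of_not_ge hskip
        have hboxp := hboxv p hpv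
        have hnbrs : dfsNbrs rows ((pvW rows : Nat) : Int) p.1 p.2 = pvKids rows p := by
          unfold pvBox at hboxp
          exact pvNbrsKids rows p (by omega) (by omega)
        rw [hnbrs]
        obtain ⟨n1, n2, n3, n4, n5, n6, n7⟩ := pvPushFold (pvKids rows p) rest vis hnd
        have hkbox : ∀ q ∈ pvKids rows p, pvBox rows q :=
          fun q hq => pvKids_box rows p q hboxp hlt hq
        have hkreach : ∀ q ∈ pvKids rows p, pvReach rows start q :=
          fun q hq => pvReach.step p q (hreachv p hpv) hlt hq
        have hbox' : ∀ q ∈ ((pvKids rows p).foldl dfsPush (rest, vis)).2, pvBox rows q := by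
          intro q hq
          rcases (n2 q).1 hq with h | h
          · exact hboxv q h
          · exact hkbox q h
        have hreach' : ∀ q ∈ ((pvKids rows p).foldl dfsPush (rest, vis)).2, pvReach rows start q := by
          intro q hq
          rcases (n2 q).1 hq with h | h
          · exact hreachv q h
          · exact hkreach q h
        have hstack' : ∀ q ∈ ((pvKids rows p).foldl dfsPush (rest, vis)).1,
            q ∈ ((pvKids rows p).foldl dfsPush (rest, vis)).2 := by
          intro q hq
          rcases n4 q hq with h | h
          · exact (n2 q).2 (Or.inl (hstack q (List.mem_cons_of_mem _ h)))
          · exact (n2 q).2 (Or.inr h)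
        have hpend' : ∀ q ∈ ((pvKids rows p).foldl dfsPush (rest, vis)).2,
            q ∈ ((pvKids rows p).foldl dfsPush (rest, vis)).1
            ∨ (q.1 + 1 < (rows.length : Int) → ∀ q' ∈ pvKids rows q,
                q' ∈ ((pvKids rows p).foldl dfsPush (rest, vis)).2) := by
          intro q hq
          rcases (n2 q).1 hq with h | h
          · rcases hpend q h with h1 | h1
            · rcases List.mem_cons.1 h1 with rfl | h1
              · exact Or.inr (fun _ q' hq' => (n2 q').2 (Or.inr hq'))
              · exact Or.inl (n3 q h1)
            · exact Or.inr (fun hl q' hq' => (n2 q').2 (Or.inl (h1 hl q' hq')))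
          · by_cases hqv : q ∈ vis
            · rcases hpend q hqv with h1 | h1
              · rcases List.mem_cons.1 h1 with rfl | h1
                · exact Or.inr (fun _ q' hq' => (n2 q').2 (Or.inr hq'))
                · exact Or.inl (n3 q h1)
              · exact Or.inr (fun hl q' hq' => (n2 q').2 (Or.inl (h1 hl q' hq')))
            · rcases n5 q hq with h1 | h1
              · exact absurd h1 hqv
              · exact Or.inl h1
        have hm' : (((((pvKids rows p).foldl dfsPush (rest, vis)).1.length : Int))
              + 2 * (((rows.length * pvW rows : Nat) : Int)
                - (((pvKids rows p).foldl dfsPush (rest, vis)).2.length : Int)) ≤ (fuel : Int)) := by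
          have hvc : ((pvKids rows p).foldl dfsPush (rest, vis)).2.length
              ≤ rows.length * pvW rows := pvCard rows _ n1 hbox'
          simp only [List.length_cons] at hm
          push_cast at hm ⊢
          omega
        obtain ⟨m1, m2, m3, m4, m5⟩ := ih ((pvKids rows p).foldl dfsPush (rest, vis)).1
          ((pvKids rows p).foldl dfsPush (rest, vis)).2 n1 hbox' hreach' hstack' hpend' hm'
        exact ⟨m1, fun q hq => m2 q ((n2 q).2 (Or.inl hq)), m3, m4, m5⟩

-- ===== VERDICT (by name: the statement is the Claim_ definition above) =====
theorem part1_spec : Claim_equal_part1 := by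
  intro data _ hpre
  unfold Spec_part1 part1 part1_alt
  unfold Pre_part1 at hpre
  simp only at hpre ⊢
  set rows : List (List Char) := (PySem.Chars.split? data.toList ['\n']).getD [] with hrowsdef
  set r0 : List Char := PySem.List.pyGetD rows 0 [] with hr0def
  set idx : Int := PySem.Chars.find r0 ['S'] with hidxdef
  have hS : 'S' ∈ r0 := hpre.1
  have hinfix : ['S'] <:+: r0 := by
    obtain ⟨u, v, huv⟩ := List.append_of_mem hS
    exact ⟨u, v, by rw [huv]; simp⟩
  have hge : (0:Int) ≤ idx := (PySem.Chars.find_nonneg_iff ..).2 hinfix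
  have hltn : idx.toNat < r0.length := by
    by_contra hcon
    have hdrop : r0.drop idx.toNat = [] := List.drop_eq_nil_of_le (by omega)
    have hp := (PySem.Chars.find_spec (s := r0) (sub := ['S']) hge).1
    rw [hdrop] at hp
    have := hp.length_le
    simp at this
  have hWeq : pvW rows = r0.length := by rw [pvW, ← hr0def]
  have hrne : rows ≠ [] := by
    intro hc
    rw [hc] at hr0def
    rw [show PySem.List.pyGetD ([] : List (List Char)) 0 [] = [] from rfl] at hr0def
    rw [hr0def] at hS
    exact List.not_mem_nil hS
  have hH : 0 < rows.length := List.length_pos_of_ne_nil hrne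
  have hW0 : 0 < r0.length := List.length_pos_of_ne_nil (List.ne_nil_of_mem hS)
  set start : Int × Int := ((0 : Int), idx) with hstdef
  have hbox : pvBox rows start := by
    unfold pvBox
    rw [hWeq]
    refine ⟨le_refl _, ?_, hge, ?_⟩
    · show (0:Int) < (rows.length : Int)
      exact_mod_cast hH
    · show idx < ((pvW rows : Nat) : Int)
      rw [hWeq]
      omega
  have hsets : PySem.Set.add PySem.Set.empty start = [start] := by
    simp [PySem.Set.add_of_not_mem, PySem.Set.empty]
  -- B's DFS computes the reachable set
  have hB := pvBLoop rows start (2 * rows.length * r0.length + 1) [start] [start]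
    (by simp)
    (by intro p hp; rw [List.mem_singleton] at hp; subst hp; exact hbox)
    (by intro p hp; rw [List.mem_singleton] at hp; subst hp; exact pvReach.init)
    (fun p hp => hp)
    (fun p hp => Or.inl hp)
    (by
      have hc : 0 < rows.length * pvW rows := by
        rw [hWeq]
        positivity
      push_cast at hc ⊢
      rw [hWeq]
      nlinarith [hc])
  set V : PySem.Set (Int × Int) :=
    dfsLoop rows ((pvW rows : Nat) : Int) (2 * rows.length * r0.length + 1) [start] [start]
    with hVdef
  obtain ⟨hVnd, hVup, hVsound, hVbox, hVcl⟩ := hB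
  have hVchar : ∀ q, q ∈ V ↔ pvReach rows start q := by
    intro q
    constructor
    · exact hVsound q
    · intro hr
      induction hr with
      | init => exact hVup start (List.mem_singleton.2 rfl)
      | step p q hp hlt hk ihp => exact hVcl p ihp hlt q hk
  -- A's loop counts the spike cells of the reachable set
  have hst0 : start.1 = 0 := by rw [hstdef]
  have hA := pvALoop rows start hst0 hbox V hVnd hVchar rows.length 0 (by omega) [start] 0
    (by simp)
    (by
      intro p
      rw [List.mem_singleton]
      constructor
      · rintro rfl
        exact ⟨pvReach.init, by rw [hst0]; simp⟩
      · rintro ⟨hr, h0⟩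
        cases hr with
        | init => rfl
        | step p' p hp' hlt' hk' =>
          exfalso
          have hl := pvKids_level rows p' p hk'
          have hb := pvReach_box rows start hbox hp'
          unfold pvBox at hb
          simp only [Nat.cast_zero] at h0
          omega)
  have hfil : V.filter (fun p => decide (((0:Nat) : Int) ≤ p.1)) = V := by
    rw [List.filter_eq_self]
    intro p hp
    have hb := hVbox p hp
    unfold pvBox at hb
    simp only [decide_eq_true_eq, Nat.cast_zero]
    omega
  have hcnt : V.countP (pvSpk rows)
      = V.countP (fun p => decide (p.1 + 1 < (rows.length : Int))
          && (PySem.List.pyGetD (PySem.List.pyGetD rows (p.1 + 1) []) p.2 ' ' == '^')) := by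
    apply List.countP_congr
    intro p hp
    have hb := hVbox p hp
    unfold pvBox at hb
    by_cases hl : p.1 + 1 < (rows.length : Int)
    · simp [pvSpk, hl]
    · have h1 : p.1 + 1 = ((rows.length : Nat) : Int) := by omega
      rw [pvSpk_out rows p h1]
      have hd : decide (p.1 + 1 < (rows.length : Int)) = false := by
        simp only [decide_eq_false_iff_not]
        exact hl
      rw [hd, Bool.false_and]
  -- assemble
  rw [hsets, hA, hfil, hcnt]
  rw [show ((r0.length : Nat) : Int) = ((pvW rows : Nat) : Int) by rw [hWeq]]
  rw [← hVdef]
  omega
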